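-- pv_equiv track=rewrite | github.com/herrkeiner/formulate-it | back-end/math4fun.py | is_factorial
-- ===== SOURCE A (Python) =====
-- def is_factorial(number):
--     '''
--         If the arg is a number returns either True or False based on the condition if the number is a factorial.
--         Otherwise return None.
--     '''
--
--     if not type(number) is int:
--         return None
--
--     (factorial, factorial_result) = (1, 1)
--
--     while number > factorial_result:
--         factorial += 1
--         factorial_result *= factorial
--
--     if number == factorial_result:
--         return True
--     else: return False
-- ===== SOURCE B (Python) =====
-- def is_factorial(number):
--     if not type(number) is int:
--         return None
--     if number < 1:
--         return False
--     n = number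
--     divisor = 1
--     while n != 1:
--         divisor += 1
--         if n % divisor != 0:
--             return False
--         n //= divisor
--     return True
-- ===== Notes on version B (the rewrite author's own statement) =====
-- stated objective: alternative
-- what changed: B decides factoriality by dividing the number down by successively incremented trial divisors until it reaches one, instead of A's multiplying factorials up until the running factorial reaches the number.
import Mathlib
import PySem

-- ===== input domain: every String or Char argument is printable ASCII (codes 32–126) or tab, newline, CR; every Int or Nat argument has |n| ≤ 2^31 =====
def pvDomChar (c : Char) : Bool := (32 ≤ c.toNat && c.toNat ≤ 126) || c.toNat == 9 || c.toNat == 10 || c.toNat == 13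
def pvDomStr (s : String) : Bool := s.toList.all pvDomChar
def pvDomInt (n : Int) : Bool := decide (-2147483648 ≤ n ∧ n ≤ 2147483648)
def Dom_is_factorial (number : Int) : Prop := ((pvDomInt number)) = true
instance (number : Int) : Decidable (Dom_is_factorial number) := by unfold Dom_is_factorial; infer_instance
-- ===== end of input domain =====

-- B decides factoriality by trial division downward (divide by 2,3,... until 1) instead of A's
-- multiplying factorials upward; alternative algorithm of the same cost, proved to return the same value.


-- ===== PORT A =====
-- while number > factorial_result: factorial += 1; factorial_result *= factorial
-- (the dite guard only makes the recursion total; it holds on every reachable state, where r ≥ 1 and f ≥ 1)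
def isFactLoopA (number f r : Int) : Int × Int :=
  if number > r then
    if _h : r < r * (f + 1) then
      isFactLoopA number (f + 1) (r * (f + 1))
    else (f, r)
  else (f, r)
termination_by (number - r).toNat
decreasing_by omega

def is_factorial (number : Int) : Option Bool :=
  let p := isFactLoopA number 1 1
  some (decide (number = p.2))

-- ===== PORT B =====
-- while n != 1: divisor += 1; if n % divisor != 0: return False; n //= divisor
-- (the dite guard only makes the recursion total; it holds on every reachable state, where n ≥ 2 and divisor+1 ≥ 2)
def isFactLoopB (n divisor : Int) : Bool :=
  if n = 1 then true
  else
    if PySem.Int.mod n (divisor + 1) ≠ 0 then false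
    else
      if _h : (PySem.Int.floordiv n (divisor + 1)).toNat < n.toNat then
        isFactLoopB (PySem.Int.floordiv n (divisor + 1)) (divisor + 1)
      else false
termination_by n.toNat

def is_factorial_alt (number : Int) : Option Bool :=
  if number < 1 then some false
  else some (isFactLoopB number 1)

-- ===== PRECONDITION & SPEC =====
def Spec_is_factorial (number : Int) (out : Option Bool) : Prop := out = is_factorial_alt number
instance (number : Int) (out : Option Bool) : Decidable (Spec_is_factorial number out) := by unfold Spec_is_factorial; infer_instance

-- ===== CLAIM (what is proved, stated in full; the proofs are below) =====
def Claim_equal_is_factorial : Prop := ∀ (number : Int), Dom_is_factorial number → Spec_is_factorial number (is_factorial number)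

-- ===== LEMMAS AND PROOFS =====

def factI (k : Nat) : Int := (Nat.factorial k : Int)

theorem factI_pos (k : Nat) : 0 < factI k := by
  simpa [factI] using Int.natCast_pos.mpr (Nat.factorial_pos k)

theorem factI_succ (k : Nat) : factI (k + 1) = factI k * (k + 1) := by
  simp [factI, Nat.factorial_succ]; ring

theorem factI_mono {j k : Nat} (h : j ≤ k) : factI j ≤ factI k := by
  simpa [factI] using Int.ofNat_le.mpr (Nat.factorial_le h)

-- A's loop: starting from (k, k!) with every earlier factorial (index ≥ 1) below number,
-- "number equals the final factorial_result" ⟺ number is some factorial k! with k ≥ 1.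
theorem loopA_spec (number : Int) (k : Nat) (hk : 1 ≤ k)
    (hmin : ∀ j, 1 ≤ j → j < k → factI j < number) :
    (number = (isFactLoopA number k (factI k)).2) ↔ ∃ m, 1 ≤ m ∧ number = factI m := by
  rw [isFactLoopA]
  by_cases hgt : number > factI k
  · have hstep : factI k < factI k * ((k : Int) + 1) := by
      have h1 := factI_pos k
      nlinarith
    rw [if_pos hgt, dif_pos hstep]
    have hcast : factI k * ((k : Int) + 1) = factI (k + 1) := by
      rw [factI_succ]
    have hmin' : ∀ j, 1 ≤ j → j < k + 1 → factI j < number := by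
      intro j h1 h2
      by_cases hjk : j < k
      · exact hmin j h1 hjk
      · have : j = k := by omega
        subst this; exact hgt
    have := loopA_spec number (k + 1) (by omega) hmin'
    rw [hcast, show ((k : Int) + 1) = ((k + 1 : Nat) : Int) by push_cast; ring]
    exact this
  · rw [if_neg hgt]
    constructor
    · intro h; exact ⟨k, hk, h⟩
    · rintro ⟨m, hm1, hm2⟩
      by_cases hmk : m < k
      · exact absurd (hmin m hm1 hmk) (by omega)
      · have : factI k ≤ factI m := factI_mono (by omega)
        simp only [not_lt] at hgt
        omega
termination_by (number - factI k).toNat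
decreasing_by omega

theorem factI_dvd {j k : Nat} (h : j ≤ k) : factI j ∣ factI k := by
  simpa [factI] using Int.natCast_dvd_natCast.mpr (Nat.factorial_dvd_factorial h)

-- B's loop: for n ≥ 1 and the divisor at d ≥ 1 (2..d already divided out),
-- the loop returns true ⟺ n · d! is some factorial k! with k ≥ d.
theorem loopB_spec (n : Int) (d : Nat) (hn : 1 ≤ n) (hd : 1 ≤ d) :
    isFactLoopB n d = true ↔ ∃ k, d ≤ k ∧ n * factI d = factI k := by
  rw [isFactLoopB]
  by_cases h1 : n = 1
  · subst h1
    constructor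
    · intro _
      exact ⟨d, le_refl d, by ring⟩
    · intro _
      simp
  · rw [if_neg h1]
    have hn2 : 2 ≤ n := by omega
    have hdpos : (0 : Int) < (d : Int) + 1 := by positivity
    -- key: a factorial witness forces k ≥ d+1 and (d+1) ∣ n
    have hkey : ∀ k, d ≤ k → n * factI d = factI k → d + 1 ≤ k ∧ ((d : Int) + 1) ∣ n := by
      intro k hdk heq
      have hk1 : d + 1 ≤ k := by
        rcases Nat.lt_or_ge d k with h | h
        · omega
        · exfalso
          have : d = k := by omega
          subst this
          have := factI_pos d
          nlinarith
      have hdvd : factI (d + 1) ∣ factI k := factI_dvd hk1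
      rw [← heq, factI_succ] at hdvd
      rcases hdvd with ⟨c, hc⟩
      refine ⟨hk1, ⟨c, ?_⟩⟩
      have hfd := factI_pos d
      have heq2 : n * factI d = (((d : Int) + 1) * c) * factI d := by
        rw [hc]; ring
      have := mul_right_cancel₀ (ne_of_gt hfd) heq2
      linarith [this]
    by_cases hmod : PySem.Int.mod n ((d : Int) + 1) = 0
    · rw [if_neg (by simpa using hmod)]
      have hdvdn : ((d : Int) + 1) ∣ n := (PySem.Int.mod_eq_zero_iff_dvd n ((d : Int) + 1)).mp hmod
      have hfd : PySem.Int.floordiv n ((d : Int) + 1) = n / ((d : Int) + 1) :=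
        PySem.Int.floordiv_eq_ediv_of_pos hdpos
      rcases hdvdn with ⟨c, hc⟩
      have hc1 : 1 ≤ c := by
        by_contra hcon
        push Not at hcon
        nlinarith
      have hcn : c < n := by nlinarith
      have hq : n / ((d : Int) + 1) = c := by
        rw [hc]; exact Int.mul_ediv_cancel_left c (ne_of_gt hdpos)
      have hlt : (PySem.Int.floordiv n ((d : Int) + 1)).toNat < n.toNat := by
        rw [hfd, hq]; omega
      rw [dif_pos hlt, hfd, hq]
      have hih := loopB_spec c (d + 1) hc1 (by omega)
      have hcast : ((d + 1 : Nat) : Int) = (d : Int) + 1 := by push_cast; ring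
      rw [hcast] at hih
      rw [hih]
      have hmul : c * factI (d + 1) = n * factI d := by
        rw [factI_succ, hc]; ring
      constructor
      · rintro ⟨k, hk1, hk2⟩
        exact ⟨k, by omega, by rw [← hmul]; exact hk2⟩
      · rintro ⟨k, hk1, hk2⟩
        exact ⟨k, (hkey k hk1 hk2).1, by rw [hmul]; exact hk2⟩
    · rw [if_pos (by simpa using hmod)]
      simp only [Bool.false_eq_true, false_iff]
      rintro ⟨k, hk1, hk2⟩
      exact hmod ((PySem.Int.mod_eq_zero_iff_dvd n ((d : Int) + 1)).mpr (hkey k hk1 hk2).2)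
termination_by n.toNat
decreasing_by omega

theorem loopA_base (number : Int) (h : ¬ number > 1) :
    isFactLoopA number 1 1 = (1, 1) := by
  rw [isFactLoopA, if_neg h]

-- ===== VERDICT (by name: the statement is the Claim_ definition above) =====
theorem is_factorial_spec : Claim_equal_is_factorial := by
  intro number _
  unfold Spec_is_factorial is_factorial is_factorial_alt
  by_cases hlt : number < 1
  · rw [if_pos hlt, loopA_base number (by omega)]
    simp
    omega
  · rw [if_neg hlt]
    show some (decide (number = (isFactLoopA number 1 1).2)) = some (isFactLoopB number 1)
    have hn1 : 1 ≤ number := by omega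
    have hA := loopA_spec number 1 (le_refl 1) (by intro j h1 h2; omega)
    have hB := loopB_spec number 1 hn1 (le_refl 1)
    have hf1 : factI 1 = 1 := by simp [factI]
    rw [hf1] at hA
    simp only [hf1, mul_one] at hB
    norm_num at hA hB
    refine congrArg some ?_
    rw [Bool.eq_iff_iff, decide_eq_true_iff, hA, hB]
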